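-- pv_equiv track=rewrite | github.com/GeorgeS1995/education | long-repeat-inside.py | repeat_inside
-- ===== SOURCE A (Python) =====
-- def repeat_inside(line):
--     framies = dict()
--     max_right_border = len(line) // 2
--     length = len(line)
--     longest_repeate = ""
--     for frame_size in range(1,max_right_border + 1):
--         for i in range(length - (frame_size*2)+1):
--             frame = line[i:frame_size + i]
--             try:
--                 framies[frame]
--             except KeyError:
--                 framies[frame] = 1
--             max_repeate = 1
--             for y in range(i, length - (frame_size*2)+1, frame_size):
--                 if frame == line[frame_size + y:2*frame_size + y]:
--                     max_repeate += 1
--                 else: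
--                     break
--             if framies[frame] < max_repeate:
--                 framies[frame] = max_repeate
--     for key in framies.keys():
--         temp = key * framies[key]
--         if framies[key] != 1 and len(longest_repeate) < len(temp):
--             longest_repeate = temp
--     return longest_repeate
-- ===== SOURCE B (Python) =====
-- def repeat_inside(line):
--     n = len(line)
--     framies = {}
--     for fs in range(1, n // 2 + 1):
--         limit = n - 2 * fs + 1
--         # reps[j] = number of consecutive copies of line[i:i+fs] starting at i = i_current+1+j,
--         # built right to left by prepending, so the value for i+fs sits at index fs-1.
--         reps = []
--         for i in range(limit - 1, -1, -1):
--             if line[i:i + fs] == line[i + fs:i + 2 * fs]: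
--                 r = 1 + (reps[fs - 1] if fs - 1 < len(reps) else 1)
--             else:
--                 r = 1
--             reps.insert(0, r)
--         for i in range(limit):
--             frame = line[i:i + fs]
--             r = reps[i]
--             if framies.get(frame, 0) < r:
--                 framies[frame] = r
--     longest = ""
--     for key in framies.keys():
--         temp = key * framies[key]
--         if framies[key] != 1 and len(longest) < len(temp):
--             longest = temp
--     return longest
-- ===== Notes on version B (the rewrite author's own statement) =====
-- stated objective: alternative
-- what changed: B replaces A's inner loop that rescans the whole chain of tandem blocks at every start position by a per-frame-size table of repeat counts built right-to-left in one pass (reps[i] = 1 + reps[i+fs] if block i matches block i+fs), then reads each count in O(1); the per-key dict aggregation and final selection are unchanged.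
import Mathlib
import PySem

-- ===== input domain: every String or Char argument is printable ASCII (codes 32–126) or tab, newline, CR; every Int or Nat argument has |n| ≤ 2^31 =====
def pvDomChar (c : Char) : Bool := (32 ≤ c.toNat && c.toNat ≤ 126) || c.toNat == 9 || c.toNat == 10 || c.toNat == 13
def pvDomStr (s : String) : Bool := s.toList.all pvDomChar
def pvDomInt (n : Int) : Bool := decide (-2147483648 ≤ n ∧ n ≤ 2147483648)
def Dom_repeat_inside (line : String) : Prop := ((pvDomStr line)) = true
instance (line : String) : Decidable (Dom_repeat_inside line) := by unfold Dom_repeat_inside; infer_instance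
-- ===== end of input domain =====

-- B replaces A's rescan of the repetition chain at every start position by a right-to-left
-- per-frame-size table of repeat counts (objective: alternative algorithm, same measured cost).

-- ===== PORT A =====
-- inner loop 'for y in range(i, limit, frame_size): if frame == line[fs+y:2fs+y]: max_repeate += 1 else: break'
def riCountA (cs : List Char) (frame : List Char) (fs : Int) : List Int → Int → Int
  | [], acc => acc
  | y :: ys, acc =>
    if frame = PySem.List.slice cs (some (fs + y)) (some (2 * fs + y)) then
      riCountA cs frame fs ys (acc + 1)
    else acc

-- the double loop building 'framies' (locals 'frame', 'max_repeate' and the rebound 'framies'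
-- of the try/except are inlined; 'framies[frame]' after the ensuring insert is getD, exact)
def riFramiesA (cs : List Char) (n : Int) : PySem.Dict (List Char) Int :=
  (PySem.List.pyRange 1 (PySem.Int.floordiv n 2 + 1) 1).foldl (fun framies frame_size =>
    (PySem.List.pyRange 0 (n - frame_size * 2 + 1) 1).foldl (fun framies i =>
      if (if (framies.get? (PySem.List.slice cs (some i) (some (frame_size + i)))).isNone then
            framies.insert (PySem.List.slice cs (some i) (some (frame_size + i))) 1
          else framies).getD (PySem.List.slice cs (some i) (some (frame_size + i))) 0 <
          riCountA cs (PySem.List.slice cs (some i) (some (frame_size + i))) frame_size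
            (PySem.List.pyRange i (n - frame_size * 2 + 1) frame_size) 1 then
        (if (framies.get? (PySem.List.slice cs (some i) (some (frame_size + i)))).isNone then
            framies.insert (PySem.List.slice cs (some i) (some (frame_size + i))) 1
          else framies).insert (PySem.List.slice cs (some i) (some (frame_size + i)))
          (riCountA cs (PySem.List.slice cs (some i) (some (frame_size + i))) frame_size
            (PySem.List.pyRange i (n - frame_size * 2 + 1) frame_size) 1)
      else
        (if (framies.get? (PySem.List.slice cs (some i) (some (frame_size + i)))).isNone then
            framies.insert (PySem.List.slice cs (some i) (some (frame_size + i))) 1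
          else framies))
      framies)
    PySem.Dict.empty

-- the final selection loop, shared verbatim by A and B (their Python texts are identical;
-- 'framies[key]' with key ∈ keys cannot miss: getD is exact; 'temp' inlined)
def riSelect (framies : PySem.Dict (List Char) Int) : List Char :=
  framies.keys.foldl (fun longest_repeate key =>
    if framies.getD key 0 ≠ 1 ∧
        longest_repeate.length < (PySem.List.pyRepeat key (framies.getD key 0)).length then
      PySem.List.pyRepeat key (framies.getD key 0)
    else longest_repeate) []

def repeat_inside (line : String) : String :=
  String.ofList (riSelect (riFramiesA line.toList (PySem.Str.len line)))

-- ===== PORT B =====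
-- the 'reps' table, built right to left by prepending ('reps.insert(0, r)' is cons; local 'r' inlined)
def riRepsB (cs : List Char) (fs limit : Int) : List Int :=
  (PySem.List.pyRange (limit - 1) (-1) (-1)).foldl (fun reps i =>
    (if PySem.List.slice cs (some i) (some (i + fs)) =
        PySem.List.slice cs (some (i + fs)) (some (i + 2 * fs)) then
      1 + (if fs - 1 < (reps.length : Int) then PySem.List.pyGetD reps (fs - 1) 0 else 1)
    else 1) :: reps) []

-- 'for i in range(limit): …' consuming the reps table ('frame', 'r' inlined; 'reps[i]' is in range: pyGetD exact)
def riInnerB (cs : List Char) (fs limit : Int) (reps : List Int)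
    (framies : PySem.Dict (List Char) Int) : PySem.Dict (List Char) Int :=
  (PySem.List.pyRange 0 limit 1).foldl (fun framies i =>
    if framies.getD (PySem.List.slice cs (some i) (some (i + fs))) 0 < PySem.List.pyGetD reps i 0 then
      framies.insert (PySem.List.slice cs (some i) (some (i + fs))) (PySem.List.pyGetD reps i 0)
    else framies)
    framies

def riFramiesB (cs : List Char) (n : Int) : PySem.Dict (List Char) Int :=
  (PySem.List.pyRange 1 (PySem.Int.floordiv n 2 + 1) 1).foldl (fun framies fs =>
    riInnerB cs fs (n - 2 * fs + 1) (riRepsB cs fs (n - 2 * fs + 1)) framies)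
    PySem.Dict.empty

def repeat_inside_alt (line : String) : String :=
  String.ofList (riSelect (riFramiesB line.toList (PySem.Str.len line)))

-- ===== PRECONDITION & SPEC =====
def Spec_repeat_inside (line : String) (out : String) : Prop := out = repeat_inside_alt line
instance (line : String) (out : String) : Decidable (Spec_repeat_inside line out) := by unfold Spec_repeat_inside; infer_instance

-- ===== CLAIM (what is proved, stated in full; the proofs are below) =====
def Claim_equal_repeat_inside : Prop := ∀ (line : String), Dom_repeat_inside line → Spec_repeat_inside line (repeat_inside line)

-- ===== LEMMAS AND PROOFS =====

-- spec value: number of consecutive copies of cs[i:i+fs] starting at i, counted as both programs do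
def repV (cs : List Char) (fs limit i : Int) : Int :=
  if h : i < limit ∧ 0 < fs then
    if PySem.List.slice cs (some i) (some (i + fs)) =
       PySem.List.slice cs (some (i + fs)) (some (i + 2 * fs)) then
      1 + repV cs fs limit (i + fs)
    else 1
  else 1
termination_by (limit - i).toNat
decreasing_by omega

theorem repV_one_le (cs : List Char) (fs limit i : Int) : 1 ≤ repV cs fs limit i := by
  unfold repV
  split
  · split
    · have := repV_one_le cs fs limit (i + fs); omega
    · omega
  · omega
termination_by (limit - i).toNat
decreasing_by omega

theorem pyRange_pos_nil (a b s : Int) (hs : 0 < s) (hab : b ≤ a) :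
    PySem.List.pyRange a b s = [] := by
  rw [PySem.List.pyRange_of_pos _ _ hs]
  simp [show ¬ a < b by omega]

theorem pyRange_pos_cons (a b s : Int) (hs : 0 < s) (hab : a < b) :
    PySem.List.pyRange a b s = a :: PySem.List.pyRange (a + s) b s := by
  rw [PySem.List.pyRange_of_pos _ _ hs, PySem.List.pyRange_of_pos _ _ hs]
  have hkey : (b - a + s - 1) / s =
      (if a + s < b then (b - (a + s) + s - 1) / s else 0) + 1 := by
    have h1 : (b - a + s - 1) = (b - (a + s) + s - 1) + 1 * s := by ring
    rw [h1, Int.add_mul_ediv_right _ _ (by omega : s ≠ 0)]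
    split
    · ring
    · have h0 : (b - (a + s) + s - 1) / s = 0 :=
        Int.ediv_eq_zero_of_lt (by omega) (by omega)
      omega
  have hnn : 0 ≤ (if a + s < b then (b - (a + s) + s - 1) / s else 0) := by
    split
    · exact Int.ediv_nonneg (by omega) (by omega)
    · omega
  simp only [if_pos hab, hkey]
  rw [Int.toNat_add hnn (by omega)]
  rw [show Int.toNat 1 = 1 from rfl, List.range_succ_eq_map, List.map_cons, List.map_map]
  congr 1
  · simp
  · simp only [apply_ite Int.toNat, Int.toNat_zero]
    apply List.map_congr_left
    intro k _
    simp [Nat.succ_eq_add_one]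
    ring

-- B's reps-building fold produces the table of repV values
theorem repsB_eq (cs : List Char) (fs limit : Int) (hfs : 1 ≤ fs) :
    ∀ (k : Int), -1 ≤ k → k ≤ limit - 1 →
    (PySem.List.pyRange k (-1) (-1)).foldl (fun reps i =>
        (if PySem.List.slice cs (some i) (some (i + fs)) =
            PySem.List.slice cs (some (i + fs)) (some (i + 2 * fs)) then
          1 + (if fs - 1 < (reps.length : Int) then PySem.List.pyGetD reps (fs - 1) 0 else 1)
        else 1) :: reps)
      ((PySem.List.pyRange (k + 1) limit 1).map (repV cs fs limit))
    = (PySem.List.pyRange 0 limit 1).map (repV cs fs limit) := by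
  suffices H : ∀ (m : Nat) (k : Int), -1 ≤ k → k ≤ limit - 1 → (k + 1).toNat = m →
      (PySem.List.pyRange k (-1) (-1)).foldl (fun reps i =>
        (if PySem.List.slice cs (some i) (some (i + fs)) =
            PySem.List.slice cs (some (i + fs)) (some (i + 2 * fs)) then
          1 + (if fs - 1 < (reps.length : Int) then PySem.List.pyGetD reps (fs - 1) 0 else 1)
        else 1) :: reps)
      ((PySem.List.pyRange (k + 1) limit 1).map (repV cs fs limit))
      = (PySem.List.pyRange 0 limit 1).map (repV cs fs limit) by
    intro k hk1 hk2; exact H _ k hk1 hk2 rfl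
  intro m
  induction m with
  | zero =>
    intro k hk1 hk2 hm
    have hk : k = -1 := by omega
    subst hk
    rw [PySem.List.pyRange_neg_one_eq_nil (by omega)]
    norm_num
  | succ m ih =>
    intro k hk1 hk2 hm
    have hk0 : 0 ≤ k := by omega
    rw [PySem.List.pyRange_neg_one_cons (by omega), List.foldl_cons]
    have hhead : (if PySem.List.slice cs (some k) (some (k + fs)) =
            PySem.List.slice cs (some (k + fs)) (some (k + 2 * fs)) then
          1 + (if fs - 1 < (((PySem.List.pyRange (k + 1) limit 1).map (repV cs fs limit)).length : Int)
               then PySem.List.pyGetD ((PySem.List.pyRange (k + 1) limit 1).map (repV cs fs limit)) (fs - 1) 0 else 1)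
        else 1) = repV cs fs limit k := by
      have hlen : (((PySem.List.pyRange (k + 1) limit 1).map (repV cs fs limit)).length : Int)
          = limit - (k + 1) := by
        rw [List.length_map, PySem.List.length_pyRange_one]; omega
      rw [repV]
      rw [dif_pos (by omega : k < limit ∧ 0 < fs)]
      by_cases hmatch : PySem.List.slice cs (some k) (some (k + fs)) =
          PySem.List.slice cs (some (k + fs)) (some (k + 2 * fs))
      · rw [if_pos hmatch, if_pos hmatch]
        congr 1
        by_cases hin : k + fs < limit
        · rw [if_pos (by omega)]
          have hidx : fs - 1 = (((fs - 1).toNat : Nat) : Int) := by omega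
          rw [hidx, PySem.List.pyGetD_natCast,
            List.getD_eq_getElem _ _ (by rw [List.length_map, PySem.List.length_pyRange_one]; omega),
            List.getElem_map, PySem.List.getElem_pyRange_one]
          have harg : k + 1 + ((fs - 1).toNat : Int) = k + fs := by omega
          rw [harg]
        · rw [if_neg (by omega)]
          rw [repV, dif_neg (by omega)]
      · rw [if_neg hmatch, if_neg hmatch]
    rw [hhead]
    have hcons : repV cs fs limit k :: (PySem.List.pyRange (k + 1) limit 1).map (repV cs fs limit)
        = (PySem.List.pyRange k limit 1).map (repV cs fs limit) := by
      rw [pyRange_pos_cons k limit 1 one_pos (by omega), List.map_cons]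
    rw [hcons]
    have := ih (k - 1) (by omega) (by omega) (by omega)
    simpa using this

-- A's inner counting loop computes repV
theorem riCountA_acc (cs frame : List Char) (fs : Int) (l : List Int) (a : Int) :
    riCountA cs frame fs l (a + 1) = riCountA cs frame fs l a + 1 := by
  induction l generalizing a with
  | nil => simp [riCountA]
  | cons y ys ih => simp only [riCountA]; split <;> [exact ih (a+1); rfl]

theorem riCountA_eq_repV (cs : List Char) (fs limit : Int) (hfs : 1 ≤ fs) :
    ∀ (i : Int), 0 ≤ i → i < limit →
    riCountA cs (PySem.List.slice cs (some i) (some (i + fs))) fs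
      (PySem.List.pyRange i limit fs) 1 = repV cs fs limit i := by
  suffices H : ∀ (m : Nat) (i : Int), 0 ≤ i → i < limit → (limit - i).toNat = m →
      riCountA cs (PySem.List.slice cs (some i) (some (i + fs))) fs
        (PySem.List.pyRange i limit fs) 1 = repV cs fs limit i by
    intro i h1 h2; exact H _ i h1 h2 rfl
  intro m
  induction m using Nat.strong_induction_on with
  | _ m ih =>
    intro i h1 h2 hm
    rw [pyRange_pos_cons i limit fs (by omega) h2]
    have e1 : fs + i = i + fs := by ring
    have e2 : 2 * fs + i = i + 2 * fs := by ring
    simp only [riCountA, e1, e2]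
    rw [repV, dif_pos (by omega : i < limit ∧ 0 < fs)]
    by_cases hmatch : PySem.List.slice cs (some i) (some (i + fs)) =
        PySem.List.slice cs (some (i + fs)) (some (i + 2 * fs))
    · rw [if_pos hmatch, if_pos hmatch]
      rw [riCountA_acc]
      by_cases hin : i + fs < limit
      · have hrw : PySem.List.slice cs (some i) (some (i + fs)) =
            PySem.List.slice cs (some (i + fs)) (some (i + fs + fs)) := by
          rw [hmatch]; congr 2; ring
        rw [hrw]
        rw [ih ((limit - (i + fs)).toNat) (by omega) (i + fs) (by omega) hin rfl]
        ring
      · rw [pyRange_pos_nil (i + fs) limit fs (by omega) (by omega)]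
        simp only [riCountA]
        rw [repV, dif_neg (by omega)]
    · rw [if_neg hmatch, if_neg hmatch]

-- one iteration of the dict-updating loop: A's try/except + compare = B's get-compare
theorem dictstep_eq (d : PySem.Dict (List Char) Int) (frame : List Char) (c : Int) (hc : 1 ≤ c) :
    (if (if (d.get? frame).isNone then d.insert frame 1 else d).getD frame 0 < c then
      (if (d.get? frame).isNone then d.insert frame 1 else d).insert frame c
    else (if (d.get? frame).isNone then d.insert frame 1 else d))
    = (if d.getD frame 0 < c then d.insert frame c else d) := by
  cases hget : d.get? frame with
  | none =>
    simp only [Option.isNone_none, if_true]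
    rw [PySem.Dict.getD_insert_self, PySem.Dict.getD_of_get?_eq_none _ _ hget]
    by_cases h1 : 1 < c
    · rw [if_pos h1, if_pos (by omega), PySem.Dict.insert_insert_self]
    · have hc1 : c = 1 := by omega
      subst hc1
      simp
  | some w =>
    simp

-- the two dict-building double loops agree (for ANY n)
theorem riRepsB_eq (cs : List Char) (fs limit : Int) (hfs : 1 ≤ fs) (hlim : 0 ≤ limit) :
    riRepsB cs fs limit = (PySem.List.pyRange 0 limit 1).map (repV cs fs limit) := by
  unfold riRepsB
  have h := repsB_eq cs fs limit hfs (limit - 1) (by omega) (by omega)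
  rw [show limit - 1 + 1 = limit by ring, PySem.List.pyRange_one_eq_nil (le_refl _),
    List.map_nil] at h
  exact h

-- the two dict-building double loops agree (for ANY n)
theorem framies_eq (cs : List Char) (n : Int) : riFramiesA cs n = riFramiesB cs n := by
  unfold riFramiesA riFramiesB
  apply PySem.List.foldl_congr_mem
  intro d fs hfs
  rw [PySem.List.mem_pyRange_one] at hfs
  have hfs1 : 1 ≤ fs := hfs.1
  have hlim : n - fs * 2 + 1 = n - 2 * fs + 1 := by ring
  rw [hlim]
  by_cases hneg : n - 2 * fs + 1 < 0
  · rw [pyRange_pos_nil 0 (n - 2 * fs + 1) 1 one_pos (by omega)]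
    unfold riInnerB
    rw [pyRange_pos_nil 0 (n - 2 * fs + 1) 1 one_pos (by omega)]
    rfl
  · unfold riInnerB
    rw [riRepsB_eq cs fs (n - 2 * fs + 1) hfs1 (by omega)]
    apply PySem.List.foldl_congr_mem
    intro d' i hi
    rw [PySem.List.mem_pyRange_one] at hi
    have e1 : fs + i = i + fs := by ring
    rw [e1]
    rw [riCountA_eq_repV cs fs (n - 2 * fs + 1) hfs1 i hi.1 hi.2]
    rw [PySem.List.pyGetD_map_pyRange_of_nonneg _ _ _ _ hi.1 hi.2]
    exact dictstep_eq d' _ _ (repV_one_le cs fs (n - 2 * fs + 1) i)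

-- ===== VERDICT (by name: the statement is the Claim_ definition above) =====
theorem repeat_inside_spec : Claim_equal_repeat_inside := by
  intro line _
  show repeat_inside line = repeat_inside_alt line
  unfold repeat_inside repeat_inside_alt
  rw [framies_eq]
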